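-- pv_equiv track=rewrite | github.com/irebas/movens-crf | elast_vol_trigger.py | divide_into_parts
-- ===== SOURCE A (Python) =====
-- def divide_into_parts(x: int, n: int):
--     base_size = x // n
--     remainder = x % n
--     result = []
--     start = 0
--
--     for i in range(n):
--         end = start + base_size
--         if i < remainder:
--             end += 1
--         result.append((start, end))
--         start = end
--
--     return result
-- ===== SOURCE B (Python) =====
-- def divide_into_parts(x: int, n: int):
--     base_size = x // n
--     remainder = x % n
--     return [(i * base_size + min(i, remainder),
--              (i + 1) * base_size + min(i + 1, remainder))
--             for i in range(n)]
-- ===== Notes on version B (the rewrite author's own statement) =====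
-- stated objective: simpler
-- what changed: Replaced A's loop-carried running-start accumulator with a single comprehension computing each interval's boundaries in closed form from its index (start = i*base + min(i, remainder)).
import Mathlib
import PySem

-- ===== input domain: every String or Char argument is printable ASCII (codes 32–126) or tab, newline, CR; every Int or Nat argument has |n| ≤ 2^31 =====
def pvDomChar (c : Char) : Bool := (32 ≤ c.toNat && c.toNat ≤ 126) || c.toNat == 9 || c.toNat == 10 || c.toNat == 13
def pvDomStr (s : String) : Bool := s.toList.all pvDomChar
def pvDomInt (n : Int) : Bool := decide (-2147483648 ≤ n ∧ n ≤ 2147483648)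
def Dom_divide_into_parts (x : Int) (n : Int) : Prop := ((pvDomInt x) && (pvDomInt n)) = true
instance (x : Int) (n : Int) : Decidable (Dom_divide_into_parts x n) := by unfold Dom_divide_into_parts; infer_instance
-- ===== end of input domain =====

-- B replaces A's loop-carried running start by a closed-form boundary per index (simpler decomposition, same O(n) cost).

-- ===== PORT A =====
-- A: thread (result, start) through the loop; end = start + base (+1 while i < remainder).
def divide_into_parts (x : Int) (n : Int) : List (Int × Int) :=
  let base_size := PySem.Int.floordiv x n
  let remainder := PySem.Int.mod x n
  let st := (PySem.List.pyRange 0 n 1).foldl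
    (fun (p : List (Int × Int) × Int) i =>
      let e0 := p.2 + base_size
      let e := if i < remainder then e0 + 1 else e0
      (p.1 ++ [(p.2, e)], e)) ([], 0)
  st.1

-- ===== PORT B =====
-- B: each interval computed independently from its index i.
def divide_into_parts_alt (x : Int) (n : Int) : List (Int × Int) :=
  let base_size := PySem.Int.floordiv x n
  let remainder := PySem.Int.mod x n
  (PySem.List.pyRange 0 n 1).map
    (fun i => (i * base_size + min i remainder,
               (i + 1) * base_size + min (i + 1) remainder))

-- ===== PRECONDITION & SPEC =====
-- Pre_ excludes only n = 0, where Python A raises ZeroDivisionError.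
def Pre_divide_into_parts (x : Int) (n : Int) : Prop := n ≠ 0
instance (x : Int) (n : Int) : Decidable (Pre_divide_into_parts x n) := by unfold Pre_divide_into_parts; infer_instance
def pvWitness_divide_into_parts : Int × Int := (10, 3)

def Spec_divide_into_parts (x : Int) (n : Int) (out : List (Int × Int)) : Prop := out = divide_into_parts_alt x n
instance (x : Int) (n : Int) (out : List (Int × Int)) : Decidable (Spec_divide_into_parts x n out) := by unfold Spec_divide_into_parts; infer_instance

-- ===== CLAIM (what is proved, stated in full; the proofs are below) =====
def Claim_equal_divide_into_parts : Prop := ∀ (x : Int) (n : Int), Dom_divide_into_parts x n → Pre_divide_into_parts x n → Spec_divide_into_parts x n (divide_into_parts x n)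

-- ===== LEMMAS AND PROOFS =====

-- Loop invariant: starting from start = a*base + min a r, A's fold over the
-- consecutive indices a, a+1, ..., a+k-1 appends exactly B's closed-form pairs.
theorem pv_loop_key (base r : Int) (k : Nat) : ∀ (a : Int) (acc : List (Int × Int)),
    (PySem.List.pyRange a (a + k) 1).foldl
      (fun (p : List (Int × Int) × Int) i =>
        let e0 := p.2 + base
        let e := if i < r then e0 + 1 else e0
        (p.1 ++ [(p.2, e)], e)) (acc, a * base + min a r)
    = (acc ++ (PySem.List.pyRange a (a + k) 1).map (fun i =>
        (i * base + min i r, (i + 1) * base + min (i + 1) r)),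
       (a + k) * base + min (a + k) r) := by
  induction k with
  | zero =>
    intro a acc
    rw [PySem.List.pyRange_one_eq_nil (by omega)]
    simp
  | succ k ih =>
    intro a acc
    have hlt : a < a + ((k : Int) + 1) := by omega
    rw [show ((k + 1 : Nat) : Int) = (k : Int) + 1 by push_cast; ring]
    rw [PySem.List.pyRange_one_cons hlt]
    simp only [List.foldl_cons, List.map_cons]
    have hstep : (if a < r then a * base + min a r + base + 1 else a * base + min a r + base)
        = (a + 1) * base + min (a + 1) r := by
      have : (a + 1) * base = a * base + base := by ring
      rw [this]; split_ifs with h <;> omega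
    have hrange : a + 1 + (k : Int) = a + ((k : Int) + 1) := by ring
    have ih' := ih (a + 1) (acc ++ [(a * base + min a r, (a + 1) * base + min (a + 1) r)])
    rw [hrange] at ih'
    simp only at ih' ⊢
    rw [hstep, ih']
    simp [List.append_assoc]

theorem divide_into_parts_eq (x n : Int) :
    divide_into_parts x n = divide_into_parts_alt x n := by
  unfold divide_into_parts divide_into_parts_alt
  by_cases hpos : 0 < n
  · have h0 : (0 : Int) * PySem.Int.floordiv x n + min 0 (PySem.Int.mod x n) = 0 := by
      have := PySem.Int.mod_nonneg x hpos
      simp; omega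
    have key := pv_loop_key (PySem.Int.floordiv x n) (PySem.Int.mod x n) n.toNat 0 []
    rw [show (0 : Int) + (n.toNat : Int) = n by omega, h0] at key
    simp only [key, List.nil_append]
  · have : PySem.List.pyRange 0 n 1 = [] := PySem.List.pyRange_one_eq_nil (by omega)
    simp [this]

-- ===== VERDICT (by name: the statement is the Claim_ definition above) =====
theorem divide_into_parts_spec : Claim_equal_divide_into_parts := by
  intro x n _ _
  exact divide_into_parts_eq x n
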